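-- pv_equiv track=rewrite | github.com/keshvi1209/The-Pitch-Visualizer | text_segmenter.py | _merge_to_limit
-- ===== SOURCE A (Python) =====
-- from typing import List
--
-- def _merge_to_limit(sentences: List[str], limit: int) -> List[str]:
--     """Merge adjacent sentences to stay within limit."""
--     while len(sentences) > limit:
--         # Find the two shortest adjacent sentences and merge them
--         min_len = float("inf")
--         min_idx = 0
--         for i in range(len(sentences) - 1):
--             combined_len = len(sentences[i]) + len(sentences[i + 1])
--             if combined_len < min_len:
--                 min_len = combined_len
--                 min_idx = i
--         sentences[min_idx] = sentences[min_idx] + " " + sentences[min_idx + 1]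
--         sentences.pop(min_idx + 1)
--     return sentences
-- ===== SOURCE B (Python) =====
-- from typing import List
--
-- def _push(q, e):
--     """Insert e into ascending-sorted q."""
--     k = len(q)
--     while k > 0 and e < q[k - 1]:
--         k -= 1
--     q.insert(k, e)
--     return q
--
-- def _merge_to_limit(sentences: List[str], limit: int) -> List[str]:
--     """Merge adjacent sentences to stay within limit.
--
--     Doubly linked list over node ids plus an ascending-sorted queue of
--     (pair_sum, left_id) candidates with lazy deletion; ids keep left-to-right
--     order, so the first queue entry that still matches the current state is
--     the leftmost shortest adjacent pair.  Does not mutate its argument.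
--     """
--     n = len(sentences)
--     if n <= limit:
--         return sentences
--     text = list(sentences)
--     ln = [len(s) for s in text]
--     nxt = [i + 1 for i in range(n)]      # n encodes "no next"
--     prv = [i - 1 for i in range(n)]      # -1 encodes "no prev"
--     alive = [True] * n
--     q = []
--     for i in range(n - 1):
--         q = _push(q, (ln[i] + ln[i + 1], i))
--     count = n
--     while count > limit:
--         s, i = q[0]
--         del q[0]
--         if not alive[i] or nxt[i] >= n or ln[i] + ln[nxt[i]] != s:
--             continue                     # stale entry: lazy deletion
--         j = nxt[i]
--         k = nxt[j]
--         text[i] = text[i] + " " + text[j]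
--         ln[i] = s + 1
--         alive[j] = False
--         nxt[i] = k
--         if k < n:
--             prv[k] = i
--             q = _push(q, (ln[i] + ln[k], i))
--         p = prv[i]
--         if p >= 0:
--             q = _push(q, (ln[p] + ln[i], p))
--         count -= 1
--     return [text[i] for i in range(n) if alive[i]]
-- ===== Notes on version B (the rewrite author's own statement) =====
-- stated objective: alternative
-- what changed: B replaces A's repeated full scans over the sentence list by a doubly linked list over node ids plus an ascending-sorted queue of (pair-sum, left-id) merge candidates with lazy deletion: each merge pops the first queue entry that still matches the current state (ids keep left-to-right order, so ties break leftmost exactly as in A) and inserts at most two updated candidates, instead of rescanning all adjacent pairs.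
import Mathlib
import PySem

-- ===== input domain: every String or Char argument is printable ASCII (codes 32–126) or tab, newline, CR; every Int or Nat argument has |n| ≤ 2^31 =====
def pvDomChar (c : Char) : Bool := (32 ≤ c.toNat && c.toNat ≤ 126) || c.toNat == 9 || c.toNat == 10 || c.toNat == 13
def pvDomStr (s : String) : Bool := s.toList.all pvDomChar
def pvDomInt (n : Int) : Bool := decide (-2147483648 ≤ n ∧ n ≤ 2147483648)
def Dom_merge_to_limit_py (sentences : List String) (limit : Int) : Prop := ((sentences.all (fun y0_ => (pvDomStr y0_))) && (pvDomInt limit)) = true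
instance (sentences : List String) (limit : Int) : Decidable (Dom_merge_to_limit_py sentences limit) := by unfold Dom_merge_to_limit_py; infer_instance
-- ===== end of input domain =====

-- B replaces A's repeated full rescans by a doubly linked list over node ids plus an
-- ascending-sorted queue of (pair-sum, left-id) candidates with lazy deletion (same O(n^2)
-- worst case, a different data structure); equivalence is about the RETURN value only
-- (A mutates `sentences` in place, B does not touch it).

-- ===== PORT A =====
-- the inner 'for i in range(len(sentences)-1)' scan; float("inf") is modelled as Option Int none
def pvAStep (sentences : List String) (st : Option Int × Int) (i : Int) : Option Int × Int :=
  -- indices i and i+1 are always in range inside this loop, so pyGetD's default is never used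
  let combined_len := PySem.Str.len (PySem.List.pyGetD sentences i "") +
                      PySem.Str.len (PySem.List.pyGetD sentences (i + 1) "")
  match st.1 with
  | none => (some combined_len, i)
  | some m => if combined_len < m then (some combined_len, i) else st

def pvAScan (sentences : List String) : Int :=
  ((PySem.List.pyRange 0 (PySem.List.len sentences - 1) 1).foldl (pvAStep sentences)
    ((none : Option Int), (0 : Int))).2

def merge_to_limit_py (sentences : List String) (limit : Int) : List String :=
  if limit < PySem.List.len sentences then
    let min_idx := pvAScan sentences
    match PySem.List.pyGet? sentences min_idx, PySem.List.pyGet? sentences (min_idx + 1) with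
    | some a, some b =>
      -- sentences[min_idx] = sentences[min_idx] + " " + sentences[min_idx+1]
      let updated := PySem.List.pySetD sentences min_idx (String.ofList (a.toList ++ ' ' :: b.toList))
      match h2 : PySem.List.pop? updated (min_idx + 1) with
      | some r => merge_to_limit_py r.2 limit
      | none => updated            -- unreachable: min_idx+1 is in range (pyGet? succeeded)
    | _, _ => sentences            -- Python raises IndexError here; excluded by Pre_
  else sentences
termination_by sentences.length
decreasing_by
  have h3 := PySem.List.length_of_pop?_eq_some _ h2
  simp only [updated, PySem.List.length_pySetD] at h3
  omega

-- ===== PORT B =====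
-- Python tuple comparison '<' on (sum, id) pairs
def pvLt (x e : Int × Int) : Bool := x.1 < e.1 || (x.1 == e.1 && x.2 < e.2)

-- _push: the 'while k > 0 and e < q[k-1]' scan, as recursion on k
def pvPushIdx (q : List (Int × Int)) (e : Int × Int) : Nat → Nat
  | 0 => 0
  | k + 1 => if pvLt e (q.getD k (0, 0)) then pvPushIdx q e k else k + 1

-- then 'q.insert(k, e)'
def pvPush (q : List (Int × Int)) (e : Int × Int) : List (Int × Int) :=
  q.insertIdx (pvPushIdx q e q.length) e

-- the 'while count > limit' loop over (text, ln, nxt, prv, alive, q, count)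
def pvBLoop (n limit : Int) (text : List String) (ln nxt prv : List Int)
    (alive : List Bool) (q : List (Int × Int)) (count : Int) :
    List String × List Bool :=
  if limit < count then
    match q with
    | [] => (text, alive)  -- Python raises IndexError here; reachable only outside Pre_
    | (s, i) :: qt =>
      if PySem.List.pyGetD alive i false = false ∨ n ≤ PySem.List.pyGetD nxt i 0 ∨
          PySem.List.pyGetD ln i 0 + PySem.List.pyGetD ln (PySem.List.pyGetD nxt i 0) 0 ≠ s then
        -- stale entry: lazy deletion ('continue')
        pvBLoop n limit text ln nxt prv alive qt count
      else
        let j := PySem.List.pyGetD nxt i 0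
        let k := PySem.List.pyGetD nxt j 0
        let text' := PySem.List.pySetD text i (String.ofList
          ((PySem.List.pyGetD text i "").toList ++ ' ' :: (PySem.List.pyGetD text j "").toList))
        let ln' := PySem.List.pySetD ln i (s + 1)
        let alive' := PySem.List.pySetD alive j false
        let nxt' := PySem.List.pySetD nxt i k
        let prv' := if k < n then PySem.List.pySetD prv k i else prv
        let q' := if k < n then
            pvPush qt (PySem.List.pyGetD ln' i 0 + PySem.List.pyGetD ln' k 0, i) else qt
        let p := PySem.List.pyGetD prv' i 0
        let q'' := if 0 ≤ p then
            pvPush q' (PySem.List.pyGetD ln' p 0 + PySem.List.pyGetD ln' i 0, p) else q'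
        pvBLoop n limit text' ln' nxt' prv' alive' q'' (count - 1)
  else (text, alive)
termination_by ((count - limit).toNat, q.length)
decreasing_by
  all_goals simp_wf
  · apply Prod.Lex.right; omega
  · apply Prod.Lex.left; omega

-- '[text[i] for i in range(n) if alive[i]]'
def pvExtract (n : Int) (r : List String × List Bool) : List String :=
  ((PySem.List.pyRange 0 n 1).filter (fun i => PySem.List.pyGetD r.2 i false)).map
    (fun i => PySem.List.pyGetD r.1 i "")

def merge_to_limit_py_alt (sentences : List String) (limit : Int) : List String :=
  let n := PySem.List.len sentences
  if n ≤ limit then sentences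
  else
    let text := sentences
    let ln := sentences.map PySem.Str.len
    let nxt := (PySem.List.pyRange 0 n 1).map (· + 1)      -- n encodes "no next"
    let prv := (PySem.List.pyRange 0 n 1).map (· - 1)      -- -1 encodes "no prev"
    let alive := sentences.map (fun _ => true)
    let q := (PySem.List.pyRange 0 (n - 1) 1).foldl
      (fun q i => pvPush q (PySem.List.pyGetD ln i 0 + PySem.List.pyGetD ln (i + 1) 0, i)) []
    pvExtract n (pvBLoop n limit text ln nxt prv alive q n)

-- ===== PRECONDITION & SPEC =====
-- Pre_ excludes exactly the inputs where A raises IndexError: a limit below 1 with a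
-- nonempty list (A merges down to one sentence and then indexes past the end).
def Pre_merge_to_limit_py (sentences : List String) (limit : Int) : Prop :=
  1 ≤ limit ∨ (sentences.length : Int) ≤ limit
instance (sentences : List String) (limit : Int) : Decidable (Pre_merge_to_limit_py sentences limit) := by unfold Pre_merge_to_limit_py; infer_instance
def pvWitness_merge_to_limit_py : List String × Int := (["ab", "c", "d e", "f"], 2)

def Spec_merge_to_limit_py (sentences : List String) (limit : Int) (out : List String) : Prop := out = merge_to_limit_py_alt sentences limit
instance (sentences : List String) (limit : Int) (out : List String) : Decidable (Spec_merge_to_limit_py sentences limit out) := by unfold Spec_merge_to_limit_py; infer_instance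

-- ===== CLAIM (what is proved, stated in full; the proofs are below) =====
def Claim_equal_merge_to_limit_py : Prop := ∀ (sentences : List String) (limit : Int), Dom_merge_to_limit_py sentences limit → Pre_merge_to_limit_py sentences limit → Spec_merge_to_limit_py sentences limit (merge_to_limit_py sentences limit)

-- ===== LEMMAS AND PROOFS =====

-- ---------- the reference computation: splice at the leftmost shortest adjacent pair ----------
-- (proof-side only; A and B are each proved equal to it)

-- each sentence paired with its length
def pvPair (s : String) : Int × String := (PySem.Str.len s, s)

-- leftmost argmin of adjacent sums, scanned from the right: (min sum, its index)
def pvRefArgmin (p q : Int × String) (rest : List (Int × String)) : Int × Nat :=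
  match rest with
  | [] => (p.1 + q.1, 0)
  | r :: rs =>
    let si := pvRefArgmin q r rs
    if p.1 + q.1 ≤ si.1 then (p.1 + q.1, 0) else (si.1, si.2 + 1)

def pvRefLoop (items : List (Int × String)) : Nat → List (Int × String)
  | 0 => items
  | k + 1 =>
    match items with
    | p :: q :: rest =>
      let si := pvRefArgmin p q rest
      let x := PySem.List.pyGetD items (si.2 : Int) (0, "")
      let y := PySem.List.pyGetD items ((si.2 : Int) + 1) (0, "")
      pvRefLoop (PySem.List.slice items none (some (si.2 : Int)) ++
               [(si.1 + 1, String.ofList (x.2.toList ++ ' ' :: y.2.toList))] ++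
               PySem.List.slice items (some ((si.2 : Int) + 2)) none) k
    | _ => items

-- adjacent length-sums of an item list
def pvSP : List (Int × String) → List Int
  | x :: y :: t => (x.1 + y.1) :: pvSP (y :: t)
  | _ => []

theorem pvSP_cons₂ (x y : Int × String) (t : List (Int × String)) :
    pvSP (x :: y :: t) = (x.1 + y.1) :: pvSP (y :: t) := rfl

theorem pvSP_length : ∀ l : List (Int × String), (pvSP l).length = l.length - 1
  | [] => by simp [pvSP]
  | [x] => by simp [pvSP]
  | x :: y :: t => by
    rw [pvSP_cons₂]
    have := pvSP_length (y :: t)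
    simp at this ⊢
    omega

theorem pvSP_getD : ∀ (l : List (Int × String)) (j : Nat), j + 1 < l.length →
    (pvSP l).getD j 0 = (l.getD j (0, "")).1 + (l.getD (j + 1) (0, "")).1
  | [], j, h => by simp at h
  | [x], j, h => by simp at h
  | x :: y :: t, 0, h => by simp [pvSP_cons₂]
  | x :: y :: t, j' + 1, h => by
    rw [pvSP_cons₂]
    simp only [List.getD_cons_succ]
    exact pvSP_getD (y :: t) j' (by simp at h ⊢; omega)

-- "(m, i) is the minimum of S with the least index"
def IsLmin (S : List Int) (m : Int) (i : Nat) : Prop :=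
  i < S.length ∧ S.getD i 0 = m ∧ (∀ j, j < S.length → m ≤ S.getD j 0) ∧ (∀ j, j < i → m < S.getD j 0)

theorem IsLmin_unique {S : List Int} {m m' : Int} {i i' : Nat}
    (h1 : IsLmin S m i) (h2 : IsLmin S m' i') : m = m' ∧ i = i' := by
  obtain ⟨hi, hgi, hmin, hlt⟩ := h1
  obtain ⟨hi', hgi', hmin', hlt'⟩ := h2
  have hmm' : m = m' := le_antisymm (hgi' ▸ hmin i' hi') (hgi ▸ hmin' i hi)
  refine ⟨hmm', ?_⟩
  by_contra hne
  rcases Nat.lt_or_ge i i' with h | h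
  · have := hlt' i h; omega
  · have hii : i' < i := Nat.lt_of_le_of_ne h (Ne.symm hne)
    have := hlt i' hii; omega

theorem pvRefArgmin_isLmin (rest : List (Int × String)) (p q : Int × String) :
    IsLmin (pvSP (p :: q :: rest)) (pvRefArgmin p q rest).1 (pvRefArgmin p q rest).2 := by
  induction rest generalizing p q with
  | nil =>
    refine ⟨by simp [pvSP, pvRefArgmin], by simp [pvSP, pvRefArgmin], ?_, ?_⟩
    · intro j hj; simp [pvSP] at hj; subst hj; simp [pvSP, pvRefArgmin]
    · intro j hj; simp [pvRefArgmin] at hj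
  | cons r rs ih =>
    obtain ⟨hi, hgi, hmin, hlt⟩ := ih q r
    simp only [pvRefArgmin]
    split
    next hle =>
      refine ⟨?_, by simp [pvSP_cons₂], ?_, ?_⟩
      · rw [pvSP_cons₂]; simp
      · intro j hj
        cases j with
        | zero => simp [pvSP_cons₂]
        | succ j' =>
          have hh := hmin j' (by rw [pvSP_cons₂] at hj; simpa using Nat.lt_of_succ_lt_succ hj)
          rw [pvSP_cons₂]
          simp only [List.getD_cons_succ]
          omega
      · intro j hj; omega
    next hgt =>
      refine ⟨?_, ?_, ?_, ?_⟩
      · rw [pvSP_cons₂]; simpa using Nat.succ_lt_succ hi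
      · rw [pvSP_cons₂]; simpa using hgi
      · intro j hj
        cases j with
        | zero => rw [pvSP_cons₂]; simp; omega
        | succ j' =>
          have hh := hmin j' (by rw [pvSP_cons₂] at hj; simpa using Nat.lt_of_succ_lt_succ hj)
          rw [pvSP_cons₂]
          simpa using hh
      · intro j hj
        cases j with
        | zero => rw [pvSP_cons₂]; simp; omega
        | succ j' =>
          have hh := hlt j' (by omega)
          rw [pvSP_cons₂]
          simpa using hh

-- items.getD / xs.getD agree through the pairing, in range
theorem pvGetD_map_pvPair (xs : List String) (j : Nat) (h : j < xs.length) :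
    (xs.map pvPair).getD j (0, "") = pvPair (xs.getD j "") := by
  rw [List.getD_eq_getElem _ _ (by simpa using h), List.getD_eq_getElem _ _ h]
  simp

-- the combined length read by A's scan at index j is the j-th adjacent sum
theorem pvCombined (xs : List String) (j : Nat) (hj : j + 1 < xs.length) :
    PySem.Str.len (PySem.List.pyGetD xs ((j : Int)) "") +
      PySem.Str.len (PySem.List.pyGetD xs ((j : Int) + 1) "") =
      (pvSP (xs.map pvPair)).getD j 0 := by
  have h1 : ((j : Int) + 1) = ((j + 1 : Nat) : Int) := by push_cast; ring
  rw [h1, PySem.List.pyGetD_natCast, PySem.List.pyGetD_natCast,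
    pvSP_getD _ j (by simpa using hj),
    pvGetD_map_pvPair xs j (by omega), pvGetD_map_pvPair xs (j + 1) hj]
  rfl

-- minimum-so-far over the first k adjacent sums
def IsLminUpto (S : List Int) (k : Nat) (m : Int) (i : Nat) : Prop :=
  i < k ∧ S.getD i 0 = m ∧ (∀ j, j < k → m ≤ S.getD j 0) ∧ (∀ j, j < i → m < S.getD j 0)

theorem pvAScan_fold (xs : List String) (k : Nat) (hk1 : 1 ≤ k)
    (hk2 : k ≤ (pvSP (xs.map pvPair)).length) :
    ∃ (m : Int) (i : Nat),
      ((List.range k).map (fun j : Nat => (0 : Int) + j)).foldl (pvAStep xs)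
        ((none : Option Int), (0 : Int)) = (some m, (i : Int)) ∧
      IsLminUpto (pvSP (xs.map pvPair)) k m i := by
  have hS : (pvSP (xs.map pvPair)).length = xs.length - 1 := by
    rw [pvSP_length]; simp
  induction k with
  | zero => omega
  | succ k ihk =>
    rcases Nat.eq_or_lt_of_le hk1 with h1 | h1
    · -- k + 1 = 1 : single step from the initial state
      have hk0 : k = 0 := by omega
      subst hk0
      have hc0 := pvCombined xs 0 (by omega)
      simp only [Nat.cast_zero, zero_add] at hc0
      refine ⟨(pvSP (xs.map pvPair)).getD 0 0, 0, ?_, ?_⟩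
      · simp only [List.range_one, List.map_cons, List.map_nil, List.foldl_cons,
          List.foldl_nil, pvAStep, Nat.cast_zero, zero_add, hc0]
      · exact ⟨by omega, rfl, by intro j hj; interval_cases j; simp, by omega⟩
    · -- k ≥ 1 : one more step after the fold over range k
      obtain ⟨m, i, hfold, hup⟩ := ihk (by omega) (by omega)
      obtain ⟨hik, hgi, hmin, hlt⟩ := hup
      have hck : k + 1 < xs.length := by omega
      have hcomb := pvCombined xs k hck
      rw [List.range_succ, List.map_append, List.foldl_append, hfold]
      simp only [List.map_cons, List.map_nil, List.foldl_cons, List.foldl_nil,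
        pvAStep, zero_add, hcomb]
      by_cases hc : (pvSP (xs.map pvPair)).getD k 0 < m
      · rw [if_pos hc]
        refine ⟨(pvSP (xs.map pvPair)).getD k 0, k, rfl, by omega, rfl, ?_, ?_⟩
        · intro j hj
          rcases Nat.lt_or_ge j k with h | h
          · have := hmin j h; omega
          · have : j = k := by omega
            subst this; omega
        · intro j hj
          have := hmin j hj; omega
      · rw [if_neg hc]
        refine ⟨m, i, rfl, by omega, hgi, ?_, hlt⟩
        intro j hj
        rcases Nat.lt_or_ge j k with h | h
        · exact hmin j h
        · have : j = k := by omega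
          subst this; omega

theorem pvAScan_isLmin (xs : List String) (h2 : 2 ≤ xs.length) :
    ∃ (m : Int) (i : Nat), pvAScan xs = (i : Int) ∧ IsLmin (pvSP (xs.map pvPair)) m i := by
  have hS : (pvSP (xs.map pvPair)).length = xs.length - 1 := by
    rw [pvSP_length]; simp
  obtain ⟨m, i, hfold, hup⟩ := pvAScan_fold xs (xs.length - 1) (by omega) (by omega)
  refine ⟨m, i, ?_, ?_⟩
  · unfold pvAScan
    rw [PySem.List.pyRange_one, PySem.List.len_eq]
    rw [show ((xs.length : Int) - 1 - 0).toNat = xs.length - 1 by omega]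
    simp only [zero_add] at hfold ⊢
    rw [hfold]
  · obtain ⟨hik, hgi, hmin, hlt⟩ := hup
    exact ⟨by omega, hgi, fun j hj => hmin j (by omega), hlt⟩

-- one A-merge is a splice: set at i then pop i+1  =  take i ++ merged ++ drop (i+2)
theorem pvSplice (xs : List String) (i : Nat) (v : String) (h : i + 1 < xs.length) :
    (xs.set i v).eraseIdx (i + 1) = xs.take i ++ v :: xs.drop (i + 2) := by
  rw [List.eraseIdx_eq_take_drop_succ, List.set_eq_take_append_cons_drop, if_pos (by omega)]
  have hlt : List.length (List.take i xs) = i := by simp; omega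
  rw [List.take_append, List.drop_append, hlt, show i + 1 + 1 = i + 2 by omega]
  simp [List.take_take, List.drop_eq_nil_of_le, hlt]

-- A equals the reference loop
theorem pvMain (n : Nat) (xs : List String) (limit : Int) (hn : xs.length = n)
    (hpre : 1 ≤ limit ∨ (xs.length : Int) ≤ limit) :
    merge_to_limit_py xs limit =
      (pvRefLoop (xs.map pvPair) (((xs.length : Int) - limit).toNat)).map (fun p => p.2) := by
  induction n using Nat.strong_induction_on generalizing xs with
  | _ n ih =>
  subst hn
  by_cases hlt : limit < PySem.List.len xs
  case neg =>
    rw [merge_to_limit_py, if_neg hlt]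
    rw [PySem.List.len_eq] at hlt
    rw [show ((xs.length : Int) - limit).toNat = 0 by omega]
    simp [pvRefLoop, pvPair, Function.comp_def]
  case pos =>
    rw [PySem.List.len_eq] at hlt
    have hlim : 1 ≤ limit := by
      rcases hpre with h | h
      · exact h
      · omega
    have hn2 : 2 ≤ xs.length := by omega
    obtain ⟨m, i, hscan, hlm⟩ := pvAScan_isLmin xs hn2
    have hS : (pvSP (xs.map pvPair)).length = xs.length - 1 := by
      rw [pvSP_length]; simp
    have hi : i < xs.length - 1 := by have := hlm.1; omega
    have hcast : ((i : Int) + 1) = ((i + 1 : Nat) : Int) := by push_cast; ring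
    have hcast2 : ((i : Int) + 2) = ((i + 2 : Nat) : Int) := by push_cast; ring
    -- the two elements A reads
    have hg1 : PySem.List.pyGet? xs (i : Int) = some (xs.getD i "") := by
      rw [PySem.List.pyGet?_eq_some_getElem xs (by omega) (by omega),
        List.getD_eq_getElem _ _ (by omega)]
      simp
    have hg2 : PySem.List.pyGet? xs ((i : Int) + 1) = some (xs.getD (i + 1) "") := by
      rw [hcast, PySem.List.pyGet?_eq_some_getElem xs (by omega) (by push_cast; omega),
        List.getD_eq_getElem _ _ (by omega)]
      simp
    set a := xs.getD i "" with ha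
    set b := xs.getD (i + 1) "" with hb
    set v := String.ofList (a.toList ++ ' ' :: b.toList) with hv
    -- the merged pair's cached length
    have hm : (pvSP (xs.map pvPair)).getD i 0 = m := hlm.2.1
    have hmv : (pvSP (xs.map pvPair)).getD i 0 = PySem.Str.len a + PySem.Str.len b := by
      rw [pvSP_getD _ i (by simpa using by omega : i + 1 < (xs.map pvPair).length),
        pvGetD_map_pvPair xs i (by omega), pvGetD_map_pvPair xs (i + 1) (by omega)]
      rfl
    have hlenv : PySem.Str.len v = m + 1 := by
      rw [hv, PySem.Str.len_eq, String.toList_ofList]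
      rw [PySem.Str.len_eq, PySem.Str.len_eq] at hmv
      simp only [List.length_append, List.length_cons]
      omega
    -- A's one merge, as a splice
    have hpop : PySem.List.pop? (xs.set i v) ((i : Int) + 1) =
        some ((xs.set i v).getD (i + 1) "", (xs.set i v).eraseIdx (i + 1)) := by
      rw [hcast, PySem.List.pop?_natCast _ (i + 1) (by simp; omega),
        List.getD_eq_getElem _ _ (by simp; omega)]
    rw [merge_to_limit_py, if_pos (by rw [PySem.List.len_eq]; omega)]
    simp only [hscan, hg1, hg2]
    split
    next r h2 =>
      simp only [hscan, PySem.List.pySetD_natCast, ← hv] at h2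
      rw [hpop] at h2
      injection h2 with h2
      rw [← h2]
      show merge_to_limit_py ((xs.set i v).eraseIdx (i + 1)) limit = _
      rw [pvSplice xs i v (by omega)]
      set xsA := xs.take i ++ v :: xs.drop (i + 2) with hxsA
      have hlenA : xsA.length = xs.length - 1 := by
        rw [hxsA]; simp; omega
      rw [ih (xs.length - 1) (by omega) xsA hlenA (by left; exact hlim)]
      -- the reference does the same merge
      have hfuel : ((xs.length : Int) - limit).toNat = (((xsA.length : Int)) - limit).toNat + 1 := by
        rw [hlenA]; omega
      rw [hfuel]
      -- destructure so that the reference's match reduces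
      obtain ⟨s1, s2, t, rfl⟩ : ∃ s1 s2 t, xs = s1 :: s2 :: t := by
        match xs, hn2 with
        | s1 :: s2 :: t, _ => exact ⟨s1, s2, t, rfl⟩
      simp only [pvRefLoop, List.map_cons]
      have hB := pvRefArgmin_isLmin (t.map pvPair) (pvPair s1) (pvPair s2)
      have hBu := IsLmin_unique hB (by simpa using hlm)
      set si := pvRefArgmin (pvPair s1) (pvPair s2) (t.map pvPair) with hsidef
      obtain ⟨hsm, hsi2⟩ := hBu
      -- the reference's reads and slices
      have hx : PySem.List.pyGetD (pvPair s1 :: pvPair s2 :: t.map pvPair) ((si.2 : Int)) (0, "") = pvPair a := by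
        rw [hsi2, PySem.List.pyGetD_natCast,
          show pvPair s1 :: pvPair s2 :: t.map pvPair = (s1 :: s2 :: t).map pvPair by simp,
          pvGetD_map_pvPair _ i (by omega)]
      have hy : PySem.List.pyGetD (pvPair s1 :: pvPair s2 :: t.map pvPair) ((si.2 : Int) + 1) (0, "") = pvPair b := by
        rw [hsi2, hcast, PySem.List.pyGetD_natCast,
          show pvPair s1 :: pvPair s2 :: t.map pvPair = (s1 :: s2 :: t).map pvPair by simp,
          pvGetD_map_pvPair _ (i + 1) (by omega)]
      rw [hx, hy]
      rw [show (PySem.List.slice (pvPair s1 :: pvPair s2 :: t.map pvPair) none (some ((si.2 : Int)))) =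
          ((s1 :: s2 :: t).map pvPair).take i by
        rw [hsi2, PySem.List.slice_to_natCast]; simp]
      rw [show (PySem.List.slice (pvPair s1 :: pvPair s2 :: t.map pvPair) (some ((si.2 : Int) + 2)) none) =
          ((s1 :: s2 :: t).map pvPair).drop (i + 2) by
        rw [hsi2, hcast2, PySem.List.slice_from_natCast]; simp]
      -- the two item lists coincide
      have hitems : ((s1 :: s2 :: t).map pvPair).take i ++
          [(si.1 + 1, String.ofList ((pvPair a).2.toList ++ ' ' :: (pvPair b).2.toList))] ++
          ((s1 :: s2 :: t).map pvPair).drop (i + 2) = xsA.map pvPair := by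
        rw [hxsA]
        simp only [List.map_append, List.map_take, List.map_cons, List.map_drop]
        rw [List.append_assoc, List.singleton_append]
        congr 1
        congr 1
        rw [show (pvPair a).2 = a from rfl, show (pvPair b).2 = b from rfl, ← hv]
        rw [show (si.1 + 1 : Int) = PySem.Str.len v by rw [hlenv, hsm]]
        rfl
      rw [hitems]
    next h2 =>
      exfalso
      simp only [hscan, PySem.List.pySetD_natCast, ← hv] at h2
      rw [hpop] at h2
      exact Option.some_ne_none _ h2


-- ---------- B-side machinery ----------

-- the order the queue is sorted by (reflexive closure of Python tuple '<')
def pvLe (a b : Int × Int) : Prop := a.1 < b.1 ∨ (a.1 = b.1 ∧ a.2 ≤ b.2)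

theorem pvLe_refl (a : Int × Int) : pvLe a a := Or.inr ⟨rfl, le_refl _⟩

theorem pvLe_of_pvLt {a b : Int × Int} (h : pvLt a b = true) : pvLe a b := by
  simp [pvLt] at h; unfold pvLe; omega

theorem pvLe_of_not_pvLt {a b : Int × Int} (h : ¬ pvLt a b = true) : pvLe b a := by
  simp [pvLt] at h; unfold pvLe; omega

theorem pvLe_trans {a b c : Int × Int} (h1 : pvLe a b) (h2 : pvLe b c) : pvLe a c := by
  unfold pvLe at *; omega

theorem pvPushIdx_le (q : List (Int × Int)) (e : Int × Int) : ∀ m, pvPushIdx q e m ≤ m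
  | 0 => le_refl _
  | m + 1 => by
    rw [pvPushIdx]
    split
    · exact le_trans (pvPushIdx_le q e m) (by omega)
    · exact le_refl _

theorem pvPushIdx_lt_after (q : List (Int × Int)) (e : Int × Int) :
    ∀ m, ∀ j, pvPushIdx q e m ≤ j → j < m → pvLt e (q.getD j (0, 0)) = true
  | 0, j, h1, h2 => absurd h2 (by omega)
  | m + 1, j, h1, h2 => by
    rw [pvPushIdx] at h1
    by_cases hc : pvLt e (q.getD m (0, 0)) = true
    · rw [if_pos hc] at h1
      rcases Nat.lt_or_ge j m with h | h
      · exact pvPushIdx_lt_after q e m j h1 h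
      · have hjm : j = m := by omega
        rw [hjm]; exact hc
    · rw [if_neg hc] at h1
      omega

theorem pvPushIdx_ge_before (q : List (Int × Int)) (e : Int × Int) :
    ∀ m k, pvPushIdx q e m = k + 1 → pvLt e (q.getD k (0, 0)) = false
  | 0, k, h => by simp [pvPushIdx] at h
  | m + 1, k, h => by
    rw [pvPushIdx] at h
    by_cases hc : pvLt e (q.getD m (0, 0)) = true
    · rw [if_pos hc] at h
      exact pvPushIdx_ge_before q e m k h
    · rw [if_neg hc] at h
      have hkm : k = m := by omega
      rw [hkm]
      exact Bool.eq_false_iff.mpr hc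

theorem mem_pvPush {q : List (Int × Int)} {e a : Int × Int} :
    a ∈ pvPush q e ↔ a ∈ q ∨ a = e := by
  rw [pvPush, List.mem_insertIdx (pvPushIdx_le q e q.length)]
  tauto

theorem pvLe_getD_mono {q : List (Int × Int)} (h : q.Pairwise pvLe) {i j : Nat}
    (hij : i ≤ j) (hj : j < q.length) : pvLe (q.getD i (0, 0)) (q.getD j (0, 0)) := by
  rcases Nat.eq_or_lt_of_le hij with rfl | hlt
  · exact pvLe_refl _
  · rw [List.getD_eq_getElem _ _ (by omega), List.getD_eq_getElem _ _ hj]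
    exact List.pairwise_iff_getElem.mp h i j (by omega) hj hlt

theorem sorted_pvPush {q : List (Int × Int)} {e : Int × Int}
    (h : q.Pairwise pvLe) : (pvPush q e).Pairwise pvLe := by
  have hkle : pvPushIdx q e q.length ≤ q.length := pvPushIdx_le q e q.length
  rw [pvPush, List.pairwise_iff_getElem]
  intro i j hi hj hij
  have hlen : (q.insertIdx (pvPushIdx q e q.length) e).length = q.length + 1 := by
    rw [List.length_insertIdx, if_pos hkle]
  have hget : ∀ m (hm : m < (q.insertIdx (pvPushIdx q e q.length) e).length),
      (q.insertIdx (pvPushIdx q e q.length) e)[m] =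
        if m < pvPushIdx q e q.length then q.getD m (0, 0)
        else if m = pvPushIdx q e q.length then e else q.getD (m - 1) (0, 0) := by
    intro m hm
    have hm2 : m < q.length + 1 := by rw [hlen] at hm; exact hm
    rw [List.getElem_insertIdx]
    split_ifs with a1 a2
    · rw [List.getD_eq_getElem _ _ (by omega)]
    · rfl
    · rw [List.getD_eq_getElem _ _ (by omega)]
  rw [hget i hi, hget j hj]
  rw [hlen] at hi hj
  split_ifs <;>
    first
      | omega
      | exact pvLe_refl _
      | exact pvLe_getD_mono h (by omega) (by omega)
      | exact pvLe_of_pvLt (pvPushIdx_lt_after q e q.length (j - 1) (by omega) (by omega))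
      | (obtain ⟨k', hk'⟩ : ∃ k', pvPushIdx q e q.length = k' + 1 :=
           ⟨pvPushIdx q e q.length - 1, by omega⟩
         exact pvLe_trans (pvLe_getD_mono h (i := i) (j := k') (by omega) (by omega))
           (pvLe_of_not_pvLt (by rw [pvPushIdx_ge_before q e q.length k' hk']; simp)))

-- getD through set
theorem pvGetD_set_self {α : Type} (l : List α) (i : Nat) (v d : α) (h : i < l.length) :
    (l.set i v).getD i d = v := by
  rw [List.getD_eq_getElem _ _ (by simpa using h)]
  simp [List.getElem_set]

theorem pvGetD_set_ne {α : Type} (l : List α) (i j : Nat) (v d : α) (h : j ≠ i) :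
    (l.set i v).getD j d = l.getD j d := by
  simp [List.getD_eq_getElem?_getD, List.getElem?_set_ne (Ne.symm h)]

-- getD on an append, at / left of the junction
theorem pvGetD_append_len {α : Type} (P : List α) (x : α) (T : List α) (d : α) :
    (P ++ x :: T).getD P.length d = x := by
  rw [List.getD_eq_getElem _ _ (by simp)]
  simp

-- the forward linked list: nxt chains through the alive ids, ending in `stop`
def pvChain (nxt : List Int) (stop : Int) : List Nat → Prop
  | [] => True
  | [x] => nxt.getD x 0 = stop
  | x :: y :: t => nxt.getD x 0 = (y : Int) ∧ pvChain nxt stop (y :: t)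

-- the backward linked list: prv of the head is `p`, then each id points to its left neighbour
def pvPChain (prv : List Int) (p : Int) : List Nat → Prop
  | [] => True
  | x :: t => prv.getD x 0 = p ∧ pvPChain prv (x : Int) t

-- every adjacent alive pair has its (current sum, left id) entry in the queue
def pvComp (ln : List Int) (q : List (Int × Int)) : List Nat → Prop
  | x :: y :: t => (ln.getD x 0 + ln.getD y 0, (x : Int)) ∈ q ∧ pvComp ln q (y :: t)
  | _ => True

-- last element of P as an Int, or p if P is empty
def pvLastD (P : List Nat) (p : Int) : Int :=
  match P.getLast? with
  | some x => (x : Int)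
  | none => p

theorem pvLastD_cons (x : Nat) (P : List Nat) (p : Int) :
    pvLastD (x :: P) p = pvLastD P (x : Int) := by
  cases P with
  | nil => simp [pvLastD]
  | cons y t =>
    cases hl : (y :: t).getLast? with
    | none => simp at hl
    | some z => simp [pvLastD, List.getLast?_cons_cons, hl]

theorem pvChain_append (nxt : List Int) (stop : Int) :
    ∀ (P : List Nat) (x : Nat) (T : List Nat),
    pvChain nxt stop (P ++ x :: T) ↔ pvChain nxt (x : Int) P ∧ pvChain nxt stop (x :: T)
  | [], x, T => by simp [pvChain]
  | [y], x, T => by simp [pvChain]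
  | y :: z :: P'', x, T => by
    have ih := pvChain_append nxt stop (z :: P'') x T
    simp only [List.cons_append] at ih ⊢
    rw [show pvChain nxt stop (y :: z :: (P'' ++ x :: T)) ↔
        (nxt.getD y 0 = (z : Int) ∧ pvChain nxt stop (z :: (P'' ++ x :: T))) from Iff.rfl]
    rw [show pvChain nxt (x : Int) (y :: z :: P'') ↔
        (nxt.getD y 0 = (z : Int) ∧ pvChain nxt (x : Int) (z :: P'')) from Iff.rfl]
    rw [ih]
    tauto

theorem pvPChain_append (prv : List Int) :
    ∀ (P : List Nat) (p : Int) (T : List Nat),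
    pvPChain prv p (P ++ T) ↔ pvPChain prv p P ∧ pvPChain prv (pvLastD P p) T
  | [], p, T => by simp [pvPChain, pvLastD]
  | y :: P', p, T => by
    have ih := pvPChain_append prv P' (y : Int) T
    simp only [List.cons_append]
    rw [show pvPChain prv p (y :: (P' ++ T)) ↔
        (prv.getD y 0 = p ∧ pvPChain prv (y : Int) (P' ++ T)) from Iff.rfl]
    rw [show pvPChain prv p (y :: P') ↔
        (prv.getD y 0 = p ∧ pvPChain prv (y : Int) P') from Iff.rfl]
    rw [ih, pvLastD_cons]
    tauto

theorem pvComp_append (ln : List Int) (q : List (Int × Int)) :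
    ∀ (P : List Nat) (x : Nat) (T : List Nat),
    pvComp ln q (P ++ x :: T) ↔ pvComp ln q (P ++ [x]) ∧ pvComp ln q (x :: T)
  | [], x, T => by simp [pvComp]
  | [y], x, T => by
    simp only [List.cons_append, List.nil_append]
    rw [show pvComp ln q [y, x] ↔ ((ln.getD y 0 + ln.getD x 0, (y : Int)) ∈ q ∧ True) from
      by simp [pvComp]]
    rw [show pvComp ln q (y :: x :: T) ↔
        ((ln.getD y 0 + ln.getD x 0, (y : Int)) ∈ q ∧ pvComp ln q (x :: T)) from Iff.rfl]
    tauto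
  | y :: z :: P'', x, T => by
    have ih := pvComp_append ln q (z :: P'') x T
    simp only [List.cons_append] at ih ⊢
    rw [show pvComp ln q (y :: z :: (P'' ++ x :: T)) ↔
        ((ln.getD y 0 + ln.getD z 0, (y : Int)) ∈ q ∧ pvComp ln q (z :: (P'' ++ x :: T))) from Iff.rfl]
    rw [show pvComp ln q (y :: z :: (P'' ++ [x])) ↔
        ((ln.getD y 0 + ln.getD z 0, (y : Int)) ∈ q ∧ pvComp ln q (z :: (P'' ++ [x]))) from Iff.rfl]
    rw [ih]
    tauto

theorem pvChain_congr {nxt nxt' : List Int} {stop : Int} :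
    ∀ {A : List Nat}, (∀ x ∈ A, nxt'.getD x 0 = nxt.getD x 0) → pvChain nxt stop A →
    pvChain nxt' stop A
  | [], _, _ => trivial
  | [x], h, hc => by
    show nxt'.getD x 0 = stop
    rw [h x (by simp)]; exact hc
  | x :: y :: t, h, hc =>
    ⟨by rw [h x (by simp)]; exact hc.1,
     pvChain_congr (fun z hz => h z (by simp [List.mem_cons] at hz ⊢; tauto)) hc.2⟩

theorem pvPChain_congr {prv prv' : List Int} :
    ∀ {A : List Nat} {p : Int}, (∀ x ∈ A, prv'.getD x 0 = prv.getD x 0) → pvPChain prv p A →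
    pvPChain prv' p A
  | [], _, _, _ => trivial
  | x :: t, p, h, hc =>
    ⟨by rw [h x (by simp)]; exact hc.1,
     pvPChain_congr (fun z hz => h z (by simp [hz])) hc.2⟩

theorem pvComp_congr {ln ln' : List Int} {q q' : List (Int × Int)} (hq : ∀ e ∈ q, e ∈ q') :
    ∀ {A : List Nat}, (∀ x ∈ A, ln'.getD x 0 = ln.getD x 0) → pvComp ln q A → pvComp ln' q' A
  | [], _, _ => trivial
  | [x], _, _ => trivial
  | x :: y :: t, hln, hc => by
    refine ⟨?_, pvComp_congr hq (fun z hz => hln z (by simp [List.mem_cons] at hz ⊢; tauto)) hc.2⟩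
    rw [hln x (by simp), hln y (by simp)]
    exact hq _ hc.1

-- dropping a stale head entry keeps completeness
theorem pvComp_tail_invalid {nn : Nat} {alive : List Bool} {nxt ln : List Int}
    {q : List (Int × Int)} {s i : Int} :
    ∀ A : List Nat, (∀ x ∈ A, x < nn ∧ alive.getD x false = true) → pvChain nxt (nn : Int) A →
    pvComp ln ((s, i) :: q) A →
    (PySem.List.pyGetD alive i false = false ∨ (nn : Int) ≤ PySem.List.pyGetD nxt i 0 ∨
      PySem.List.pyGetD ln i 0 + PySem.List.pyGetD ln (PySem.List.pyGetD nxt i 0) 0 ≠ s) →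
    pvComp ln q A
  | [], _, _, _, _ => trivial
  | [x], _, _, _, _ => trivial
  | x :: y :: t, hmem, hch, hcomp, hinv => by
    refine ⟨?_, pvComp_tail_invalid (y :: t) (fun z hz => hmem z (by simp [hz])) hch.2 hcomp.2 hinv⟩
    rcases List.mem_cons.mp hcomp.1 with heq | hmemq
    · exfalso
      have hx : (x : Int) = i := congrArg Prod.snd heq
      have hsum : ln.getD x 0 + ln.getD y 0 = s := congrArg Prod.fst heq
      have hax : alive.getD x false = true := (hmem x (by simp)).2
      have hnx : nxt.getD x 0 = (y : Int) := hch.1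
      have hyn : y < nn := (hmem y (by simp)).1
      rw [← hx] at hinv
      simp only [PySem.List.pyGetD_natCast] at hinv
      rcases hinv with h | h | h
      · rw [hax] at h; exact absurd h (by simp)
      · rw [hnx] at h; exact absurd h (by push_cast; omega)
      · rw [hnx, PySem.List.pyGetD_natCast] at h
        exact h hsum
    · exact hmemq

-- positional form of completeness
theorem pvComp_getD (ln : List Int) (q : List (Int × Int)) :
    ∀ A : List Nat, pvComp ln q A → ∀ k, k + 1 < A.length →
    (ln.getD (A.getD k 0) 0 + ln.getD (A.getD (k + 1) 0) 0, (A.getD k 0 : Int)) ∈ q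
  | [], _, k, hk => by simp at hk
  | [x], _, k, hk => by simp at hk
  | x :: y :: t, hcomp, 0, hk => hcomp.1
  | x :: y :: t, hcomp, k + 1, hk => by
    simpa using pvComp_getD ln q (y :: t) hcomp.2 k (by simp at hk ⊢; omega)

-- the items the reference works on: each alive id's (length, text)
def pvItems (ln : List Int) (text : List String) (A : List Nat) : List (Int × String) :=
  A.map (fun a => (ln.getD a 0, text.getD a ""))

theorem pvItems_getD (ln : List Int) (text : List String) (A : List Nat) (k : Nat)
    (h : k < A.length) :
    (pvItems ln text A).getD k (0, "") = (ln.getD (A.getD k 0) 0, text.getD (A.getD k 0) "") := by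
  rw [pvItems, List.getD_eq_getElem _ _ (by simpa using h), List.getElem_map]
  rw [List.getD_eq_getElem _ _ h]

-- strict monotonicity of a (<)-pairwise list, in getD form
theorem pvPairwise_getD_lt {A : List Nat} (h : A.Pairwise (· < ·)) {k1 k2 : Nat}
    (h12 : k1 < k2) (h2 : k2 < A.length) : A.getD k1 0 < A.getD k2 0 := by
  rw [List.getD_eq_getElem _ _ (by omega), List.getD_eq_getElem _ _ h2]
  exact List.pairwise_iff_getElem.mp h k1 k2 (by omega) h2 h12

-- the loop invariant
structure pvInv (nn : Nat) (text : List String) (ln nxt prv : List Int)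
    (alive : List Bool) (q : List (Int × Int)) (A : List Nat) : Prop where
  hlen_text : text.length = nn
  hlen_ln : ln.length = nn
  hlen_nxt : nxt.length = nn
  hlen_prv : prv.length = nn
  hlen_alive : alive.length = nn
  hsorted : A.Pairwise (· < ·)
  hmem : ∀ a : Nat, a ∈ A ↔ (a < nn ∧ alive.getD a false = true)
  hchain : pvChain nxt (nn : Int) A
  hpchain : pvPChain prv (-1) A
  hq_sorted : q.Pairwise pvLe
  hq_bound : ∀ e ∈ q, 0 ≤ e.2 ∧ e.2 < (nn : Int)
  hq_comp : pvComp ln q A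

-- a valid head entry is the leftmost minimal adjacent pair
theorem pvHead_isLmin {ln : List Int} {text : List String}
    {qt : List (Int × Int)} {s : Int} {P S : List Nat} {a b : Nat}
    (hsorted : (P ++ a :: b :: S).Pairwise (· < ·))
    (hq_sorted : ((s, (a : Int)) :: qt).Pairwise pvLe)
    (hq_comp : pvComp ln ((s, (a : Int)) :: qt) (P ++ a :: b :: S))
    (hs : s = ln.getD a 0 + ln.getD b 0) :
    IsLmin (pvSP (pvItems ln text (P ++ a :: b :: S))) s P.length := by
  set A := P ++ a :: b :: S with hA
  have hlenA : A.length = P.length + S.length + 2 := by simp [hA]; omega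
  have hSP : (pvSP (pvItems ln text A)).length = A.length - 1 := by
    rw [pvSP_length, pvItems, List.length_map]
  have hgetDa : A.getD P.length 0 = a := pvGetD_append_len P a (b :: S) 0
  have hgetDb : A.getD (P.length + 1) 0 = b := by
    rw [hA, show P ++ a :: b :: S = (P ++ [a]) ++ b :: S by simp,
      show P.length + 1 = (P ++ [a]).length by simp]
    exact pvGetD_append_len _ b S 0
  have hsum : ∀ k, k + 1 < A.length → (pvSP (pvItems ln text A)).getD k 0 =
      ln.getD (A.getD k 0) 0 + ln.getD (A.getD (k + 1) 0) 0 := by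
    intro k hk
    rw [pvSP_getD _ k (by rw [pvItems, List.length_map]; omega),
      pvItems_getD _ _ _ _ (by omega), pvItems_getD _ _ _ _ (by omega)]
  have hhead_le : ∀ e ∈ ((s, (a : Int)) :: qt), pvLe (s, (a : Int)) e := by
    intro e he
    rcases List.mem_cons.mp he with rfl | h
    · right; exact ⟨rfl, le_refl _⟩
    · exact (List.pairwise_cons.mp hq_sorted).1 e h
  refine ⟨by omega, ?_, ?_, ?_⟩
  · rw [hsum P.length (by omega), hgetDa, hgetDb, hs]
  · intro k hk
    have hk' : k + 1 < A.length := by omega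
    have hmemk := pvComp_getD ln ((s, (a : Int)) :: qt) A hq_comp k hk'
    have hle := hhead_le _ hmemk
    rw [hsum k hk']
    rcases hle with h | ⟨h, _⟩
    · exact le_of_lt h
    · exact le_of_eq h
  · intro k hk
    have hk' : k + 1 < A.length := by omega
    have hmemk := pvComp_getD ln ((s, (a : Int)) :: qt) A hq_comp k hk'
    have hle := hhead_le _ hmemk
    have hlt : A.getD k 0 < a := by
      have := pvPairwise_getD_lt hsorted (k1 := k) (k2 := P.length) hk (by omega)
      rwa [hgetDa] at this
    rw [hsum k hk']
    rcases hle with h | ⟨h, h2⟩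
    · exact h
    · exfalso
      have : (a : Int) ≤ (A.getD k 0 : Int) := h2
      omega

-- unfolding one reference merge into take/drop form
theorem pvRefLoop_succ (p0 q0 : Int × String) (rest : List (Int × String)) (f : Nat) :
    pvRefLoop (p0 :: q0 :: rest) (f + 1) =
      pvRefLoop ((p0 :: q0 :: rest).take (pvRefArgmin p0 q0 rest).2 ++
        [((pvRefArgmin p0 q0 rest).1 + 1, String.ofList
          (((p0 :: q0 :: rest).getD (pvRefArgmin p0 q0 rest).2 (0, "")).2.toList ++
            ' ' :: ((p0 :: q0 :: rest).getD ((pvRefArgmin p0 q0 rest).2 + 1) (0, "")).2.toList))] ++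
        (p0 :: q0 :: rest).drop ((pvRefArgmin p0 q0 rest).2 + 2)) f := by
  conv_lhs => rw [pvRefLoop]
  have hc1 : ((pvRefArgmin p0 q0 rest).2 : Int) + 1 = (((pvRefArgmin p0 q0 rest).2 + 1 : Nat) : Int) := by
    push_cast; ring
  have hc2 : ((pvRefArgmin p0 q0 rest).2 : Int) + 2 = (((pvRefArgmin p0 q0 rest).2 + 2 : Nat) : Int) := by
    push_cast; ring
  simp only [hc1, hc2, PySem.List.pyGetD_natCast, PySem.List.slice_to_natCast,
    PySem.List.slice_from_natCast]

-- what the port's extraction computes, in getD form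
theorem pvExtract_eq (nn : Nat) (t : List String) (al : List Bool) :
    pvExtract (nn : Int) (t, al) =
      ((List.range nn).filter (fun a => al.getD a false)).map (fun a => t.getD a "") := by
  unfold pvExtract
  rw [PySem.List.pyRange_one]
  rw [show (((nn : Int)) - 0).toNat = nn by omega]
  rw [List.filter_map, List.map_map]
  congr 1
  · funext k
    simp [PySem.List.pyGetD_natCast]
  · apply List.filter_congr
    intro x _
    simp [PySem.List.pyGetD_natCast]


-- dropping a head entry whose id occurs nowhere keeps completeness
theorem pvComp_tail_ne {ln : List Int} {q : List (Int × Int)} {s i : Int} :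
    ∀ A : List Nat, (∀ x ∈ A, (x : Int) ≠ i) → pvComp ln ((s, i) :: q) A → pvComp ln q A
  | [], _, _ => trivial
  | [x], _, _ => trivial
  | x :: y :: t, h, hc => by
    refine ⟨?_, pvComp_tail_ne (y :: t) (fun z hz => h z (by simp [hz])) hc.2⟩
    rcases List.mem_cons.mp hc.1 with heq | hm
    · exact absurd (congrArg Prod.snd heq) (h x (by simp))
    · exact hm

-- two strictly sorted lists with the same members are equal
theorem pvSortedEq {A B : List Nat} (hA : A.Pairwise (· < ·)) (hB : B.Pairwise (· < ·))
    (h : ∀ x, x ∈ A ↔ x ∈ B) : A = B := by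
  have hna : A.Nodup := hA.imp (fun h => Nat.ne_of_lt h)
  have hnb : B.Nodup := hB.imp (fun h => Nat.ne_of_lt h)
  have hperm : A.Perm B := by rw [List.perm_ext_iff_of_nodup hna hnb]; exact h
  exact List.Perm.eq_of_pairwise (fun a b _ _ h1 h2 => by omega)
    (hA.imp le_of_lt) (hB.imp le_of_lt) hperm

-- the extraction under the invariant's membership characterization
theorem pvExtract_of_inv {nn : Nat} {text : List String} {alive : List Bool} {A : List Nat}
    (hsorted : A.Pairwise (· < ·))
    (hmem : ∀ a : Nat, a ∈ A ↔ (a < nn ∧ alive.getD a false = true)) :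
    pvExtract (nn : Int) (text, alive) = A.map (fun a => text.getD a "") := by
  rw [pvExtract_eq]
  congr 1
  apply pvSortedEq (List.pairwise_lt_range.filter _) hsorted
  intro x
  rw [List.mem_filter, List.mem_range, hmem x]

theorem pvItems_map_snd (ln : List Int) (text : List String) (A : List Nat) :
    (pvItems ln text A).map (fun p => p.2) = A.map (fun a => text.getD a "") := by
  simp [pvItems, List.map_map, Function.comp_def]

-- splicing the items after a merge
theorem pvItemsMerge (ln : List Int) (text : List String) (P S : List Nat) (a b : Nat)
    (v : Int) (m : String) (hlnlen : a < ln.length) (htlen : a < text.length)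
    (hPa : ∀ x ∈ P, x ≠ a) (hSa : ∀ x ∈ S, x ≠ a) :
    pvItems (ln.set a v) (text.set a m) (P ++ a :: S) =
      (pvItems ln text (P ++ a :: b :: S)).take P.length ++ [(v, m)] ++
      (pvItems ln text (P ++ a :: b :: S)).drop (P.length + 2) := by
  unfold pvItems
  simp only [List.map_append, List.map_cons]
  rw [show P.length =
      (P.map (fun x => (ln.getD x 0, text.getD x ""))).length by simp]
  rw [List.take_left]
  rw [show (P.map (fun x => (ln.getD x 0, text.getD x ""))).length + 2 =
      ((P.map (fun x => (ln.getD x 0, text.getD x ""))) ++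
        [(ln.getD a 0, text.getD a ""), (ln.getD b 0, text.getD b "")]).length by simp]
  rw [show (P.map (fun x => (ln.getD x 0, text.getD x ""))) ++
        (ln.getD a 0, text.getD a "") :: (ln.getD b 0, text.getD b "") ::
        S.map (fun x => (ln.getD x 0, text.getD x "")) =
      ((P.map (fun x => (ln.getD x 0, text.getD x ""))) ++
        [(ln.getD a 0, text.getD a ""), (ln.getD b 0, text.getD b "")]) ++
        S.map (fun x => (ln.getD x 0, text.getD x "")) by simp]
  rw [List.drop_left, List.append_assoc, List.singleton_append]
  congr 1
  · apply List.map_congr_left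
    intro x hx
    rw [pvGetD_set_ne _ _ _ _ _ (hPa x hx), pvGetD_set_ne _ _ _ _ _ (hPa x hx)]
  · congr 1
    · rw [pvGetD_set_self _ _ _ _ hlnlen, pvGetD_set_self _ _ _ _ htlen]
    · apply List.map_congr_left
      intro x hx
      rw [pvGetD_set_ne _ _ _ _ _ (hSa x hx), pvGetD_set_ne _ _ _ _ _ (hSa x hx)]

-- the invariant is preserved by one merge
theorem pvMergeInv {nn : Nat} {text : List String} {ln nxt prv : List Int} {alive : List Bool}
    {qt q'' : List (Int × Int)} {s : Int} {P S : List Nat} {a b : Nat}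
    (hlen_text : text.length = nn) (hlen_ln : ln.length = nn) (hlen_nxt : nxt.length = nn)
    (hlen_prv : prv.length = nn) (hlen_alive : alive.length = nn)
    (hsorted : (P ++ a :: b :: S).Pairwise (· < ·))
    (hmem : ∀ x : Nat, x ∈ P ++ a :: b :: S ↔ (x < nn ∧ alive.getD x false = true))
    (hchain : pvChain nxt (nn : Int) (P ++ a :: b :: S))
    (hpchain : pvPChain prv (-1) (P ++ a :: b :: S))
    (hq_comp : pvComp ln ((s, (a : Int)) :: qt) (P ++ a :: b :: S))
    (hq''_sorted : q''.Pairwise pvLe)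
    (hq''_bound : ∀ e ∈ q'', 0 ≤ e.2 ∧ e.2 < (nn : Int))
    (hq''_mem : ∀ e ∈ qt, e ∈ q'')
    (hpush1 : S = [] ∨ ∃ d S', S = d :: S' ∧
      ((ln.set a (s + 1)).getD a 0 + (ln.set a (s + 1)).getD d 0, (a : Int)) ∈ q'')
    (hpush2 : P = [] ∨ ∃ P₀ pl, P = P₀ ++ [pl] ∧
      ((ln.set a (s + 1)).getD pl 0 + (ln.set a (s + 1)).getD a 0, (pl : Int)) ∈ q'') :
    pvInv nn (text.set a (String.ofList ((text.getD a "").toList ++ ' ' :: (text.getD b "").toList)))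
      (ln.set a (s + 1)) (nxt.set a (nxt.getD b 0))
      (if nxt.getD b 0 < (nn : Int) then prv.set (nxt.getD b 0).toNat (a : Int) else prv)
      (alive.set b false) q'' (P ++ a :: S) := by
  -- order facts
  have hpw := List.pairwise_append.mp hsorted
  have hPlt : ∀ x ∈ P, ∀ y ∈ a :: b :: S, x < y := hpw.2.2
  have habS := hpw.2.1
  have hab : a < b := (List.pairwise_cons.mp habS).1 b (by simp)
  have haS : ∀ x ∈ S, a < x := fun x hx => (List.pairwise_cons.mp habS).1 x (by simp [hx])
  have hbS : ∀ x ∈ S, b < x := fun x hx =>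
    (List.pairwise_cons.mp (List.pairwise_cons.mp habS).2).1 x hx
  have hPa : ∀ x ∈ P, x < a := fun x hx => hPlt x hx a (by simp)
  have hPb : ∀ x ∈ P, x < b := fun x hx => hPlt x hx b (by simp)
  have ha_nn : a < nn := ((hmem a).mp (by simp)).1
  have hb_nn : b < nn := ((hmem b).mp (by simp)).1
  -- chain decompositions
  have hch := (pvChain_append nxt (nn : Int) P a (b :: S)).mp hchain
  have hchP := hch.1
  have hnab : nxt.getD a 0 = (b : Int) := hch.2.1
  have hchbS : pvChain nxt (nn : Int) (b :: S) := hch.2.2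
  have hpch := (pvPChain_append prv P (-1) (a :: b :: S)).mp hpchain
  have hpchP := hpch.1
  have hpa : prv.getD a 0 = pvLastD P (-1) := hpch.2.1
  have hpchbS : pvPChain prv ((a : Nat) : Int) (b :: S) := hpch.2.2
  -- completeness decompositions
  have hcsp := (pvComp_append ln ((s, (a : Int)) :: qt) P a (b :: S)).mp hq_comp
  have hcompPa : pvComp ln ((s, (a : Int)) :: qt) (P ++ [a]) := hcsp.1
  have hcompabS : pvComp ln ((s, (a : Int)) :: qt) (a :: b :: S) := hcsp.2
  constructor
  case hlen_text => simp [hlen_text]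
  case hlen_ln => simp [hlen_ln]
  case hlen_nxt => simp [hlen_nxt]
  case hlen_prv => split <;> simp [hlen_prv]
  case hlen_alive => simp [hlen_alive]
  case hsorted =>
    refine hsorted.sublist ?_
    exact List.Sublist.append (List.Sublist.refl P)
      (List.Sublist.cons₂ a (List.sublist_cons_self b S))
  case hmem =>
    intro x
    by_cases hxb : x = b
    · constructor
      · intro hx
        exfalso
        rw [hxb] at hx
        rcases List.mem_append.mp hx with h | h
        · exact absurd (hPb b h) (by omega)
        · rcases List.mem_cons.mp h with h' | h'
          · omega
          · exact absurd (hbS b h') (by omega)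
      · rintro ⟨-, hx2⟩
        rw [hxb, pvGetD_set_self _ _ _ _ (by omega)] at hx2
        exact absurd hx2 (by simp)
    · rw [pvGetD_set_ne _ _ _ _ _ hxb]
      rw [← hmem x]
      constructor
      · intro hx
        rcases List.mem_append.mp hx with h | h
        · exact List.mem_append.mpr (Or.inl h)
        · rcases List.mem_cons.mp h with h' | h'
          · exact List.mem_append.mpr (Or.inr (by simp [h']))
          · exact List.mem_append.mpr (Or.inr (by simp [h']))
      · intro hx
        rcases List.mem_append.mp hx with h | h
        · exact List.mem_append.mpr (Or.inl h)
        · rcases List.mem_cons.mp h with h' | h'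
          · exact List.mem_append.mpr (Or.inr (by simp [h']))
          · rcases List.mem_cons.mp h' with h'' | h''
            · exact absurd h'' hxb
            · exact List.mem_append.mpr (Or.inr (by simp [h'']))
  case hchain =>
    refine (pvChain_append _ _ P a S).mpr ⟨?_, ?_⟩
    · exact pvChain_congr
        (fun x hx => pvGetD_set_ne _ _ _ _ _ (by have := hPa x hx; omega)) hchP
    · cases S with
      | nil =>
        show (nxt.set a (nxt.getD b 0)).getD a 0 = (nn : Int)
        rw [pvGetD_set_self _ _ _ _ (by omega)]
        exact hchbS
      | cons d S' =>
        refine ⟨?_, ?_⟩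
        · show (nxt.set a (nxt.getD b 0)).getD a 0 = (d : Int)
          rw [pvGetD_set_self _ _ _ _ (by omega)]
          exact hchbS.1
        · exact pvChain_congr
            (fun x hx => pvGetD_set_ne _ _ _ _ _
              (by have := haS x (by simp [List.mem_cons] at hx ⊢; tauto); omega)) hchbS.2
  case hpchain =>
    have hprv_eq : ∀ x : Nat, x ≤ b →
        (if nxt.getD b 0 < (nn : Int) then prv.set (nxt.getD b 0).toNat (a : Int) else prv).getD x 0
          = prv.getD x 0 := by
      intro x hx
      split
      case isTrue h =>
        cases S with
        | nil => exact absurd hchbS (by intro hh; rw [hh] at h; omega)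
        | cons d S' =>
          rw [hchbS.1]
          exact pvGetD_set_ne _ _ _ _ _ (by have := hbS d (by simp); omega)
      case isFalse h => rfl
    refine (pvPChain_append _ P (-1) (a :: S)).mpr ⟨?_, ?_⟩
    · exact pvPChain_congr (fun x hx => hprv_eq x (by have := hPb x hx; omega)) hpchP
    · refine ⟨by rw [hprv_eq a (by omega)]; exact hpa, ?_⟩
      cases S with
      | nil => trivial
      | cons d S' =>
        have hc : nxt.getD b 0 = (d : Int) := hchbS.1
        have hdnn : d < nn := ((hmem d).mp (by simp)).1
        refine ⟨?_, ?_⟩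
        · rw [if_pos (by rw [hc]; exact_mod_cast hdnn), hc]
          rw [show ((d : Int)).toNat = d by omega]
          exact pvGetD_set_self _ _ _ _ (by omega)
        · have hpS' : pvPChain prv ((d : Nat) : Int) S' := hpchbS.2.2
          exact pvPChain_congr
            (fun x hx => by
              have hdx : d < x := by
                have hxS : x ∈ d :: S' := by simp [hx]
                have := (List.pairwise_cons.mp (List.pairwise_cons.mp
                  (List.pairwise_cons.mp habS).2).2).1 x hx
                exact this
              split
              case isTrue h =>
                rw [hc, show ((d : Int)).toNat = d by omega]
                exact pvGetD_set_ne _ _ _ _ _ (by omega)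
              case isFalse h => rfl) hpS'
  case hq_sorted => exact hq''_sorted
  case hq_bound => exact hq''_bound
  case hq_comp =>
    refine (pvComp_append _ _ P a S).mpr ⟨?_, ?_⟩
    · rcases hpush2 with rfl | ⟨P₀, pl, rfl, hm2⟩
      · trivial
      · rw [show P₀ ++ [pl] ++ [a] = P₀ ++ pl :: [a] by simp]
        refine (pvComp_append _ _ P₀ pl [a]).mpr ⟨?_, ?_⟩
        · -- pairs inside P, with updated ln and queue
          have h1 : pvComp ln ((s, (a : Int)) :: qt) (P₀ ++ [pl]) := by
            have := (pvComp_append ln ((s, (a : Int)) :: qt) P₀ pl [a]).mp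
              (by simpa using hcompPa)
            exact this.1
          have h2 : pvComp ln qt (P₀ ++ [pl]) :=
            pvComp_tail_ne _ (fun x hx => by
              have := hPa x (by simp [hx])
              omega) h1
          exact pvComp_congr (fun e he => hq''_mem e he)
            (fun x hx => pvGetD_set_ne _ _ _ _ _ (by have := hPa x (by simp [hx]); omega)) h2
        · exact ⟨hm2, trivial⟩
    · rcases hpush1 with rfl | ⟨d, S', rfl, hm1⟩
      · trivial
      · refine ⟨hm1, ?_⟩
        have h1 : pvComp ln ((s, (a : Int)) :: qt) (d :: S') := hcompabS.2.2
        have h2 : pvComp ln qt (d :: S') :=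
          pvComp_tail_ne _ (fun x hx => by have := haS x (by simpa using hx); omega) h1
        exact pvComp_congr (fun e he => hq''_mem e he)
          (fun x hx => pvGetD_set_ne _ _ _ _ _ (by have := haS x (by simpa using hx); omega)) h2

-- B's loop equals the reference loop
theorem pvBLoop_eq (nn : Nat) (limit : Int) (hlim : 1 ≤ limit) :
    ∀ (fuel : Nat) (text : List String) (ln nxt prv : List Int) (alive : List Bool)
      (q : List (Int × Int)) (A : List Nat),
      pvInv nn text ln nxt prv alive q A →
      fuel = (((A.length : Int)) - limit).toNat →
      pvExtract (nn : Int) (pvBLoop (nn : Int) limit text ln nxt prv alive q ((A.length : Int)))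
        = (pvRefLoop (pvItems ln text A) fuel).map (fun p => p.2) := by
  intro fuel
  induction fuel with
  | zero =>
    intro text ln nxt prv alive q A hInv hfuel
    rw [pvBLoop.eq_def, if_neg (by omega)]
    rw [show pvRefLoop (pvItems ln text A) 0 = pvItems ln text A from rfl]
    rw [pvExtract_of_inv hInv.hsorted hInv.hmem, pvItems_map_snd]
  | succ f ihf =>
    intro text ln nxt prv alive q A hInv hfuel
    have hcnt : limit < (A.length : Int) := by omega
    have hA2 : 2 ≤ A.length := by omega
    revert hInv
    induction q with
    | nil =>
      intro hInv
      exfalso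
      obtain ⟨x, y, t, rfl⟩ : ∃ x y t, A = x :: y :: t := by
        match A, hA2 with
        | x :: y :: t, _ => exact ⟨x, y, t, rfl⟩
      exact absurd hInv.hq_comp.1 (List.not_mem_nil)
    | cons e qt ihq =>
      obtain ⟨s, i⟩ := e
      intro hInv
      by_cases hval : (PySem.List.pyGetD alive i false = false ∨
          (nn : Int) ≤ PySem.List.pyGetD nxt i 0 ∨
          PySem.List.pyGetD ln i 0 +
            PySem.List.pyGetD ln (PySem.List.pyGetD nxt i 0) 0 ≠ s)
      · -- stale entry: drop it and continue
        rw [pvBLoop, if_pos hcnt, if_pos hval]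
        exact ihq ⟨hInv.hlen_text, hInv.hlen_ln, hInv.hlen_nxt, hInv.hlen_prv, hInv.hlen_alive,
          hInv.hsorted, hInv.hmem, hInv.hchain, hInv.hpchain,
          (List.pairwise_cons.mp hInv.hq_sorted).2,
          fun e he => hInv.hq_bound e (by simp [he]),
          pvComp_tail_invalid A (fun x hx => (hInv.hmem x).mp hx) hInv.hchain hInv.hq_comp hval⟩
      · -- valid entry: merge
        have hval' := hval
        push_neg at hval
        obtain ⟨hval1, hval2, hval3⟩ := hval
        have hbound := hInv.hq_bound (s, i) (by simp)
        have hi0 : 0 ≤ i := hbound.1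
        lift i to Nat using hi0 with a
        have hin : a < nn := by exact_mod_cast hbound.2
        rw [PySem.List.pyGetD_natCast] at hval1 hval2 hval3
        replace hval1 : alive.getD a false = true := by simpa using hval1
        have haA : a ∈ A := (hInv.hmem a).mpr ⟨hin, hval1⟩
        obtain ⟨P, T, rfl⟩ := List.append_of_mem haA
        have hch := (pvChain_append nxt (nn : Int) P a T).mp hInv.hchain
        cases T with
        | nil =>
          exfalso
          have hend : nxt.getD a 0 = (nn : Int) := hch.2
          rw [hend] at hval2
          omega
        | cons b S =>
        have hnab : nxt.getD a 0 = (b : Int) := hch.2.1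
        have hchbS : pvChain nxt (nn : Int) (b :: S) := hch.2.2
        have hb_nn : b < nn := ((hInv.hmem b).mp (by simp)).1
        rw [show PySem.List.pyGetD nxt ((a : Nat) : Int) 0 = nxt.getD a 0 from
          PySem.List.pyGetD_natCast _ _ _] at hval3
        rw [hnab, PySem.List.pyGetD_natCast] at hval3
        -- order facts
        have hpw := List.pairwise_append.mp hInv.hsorted
        have hab : a < b := (List.pairwise_cons.mp hpw.2.1).1 b (by simp)
        have haS : ∀ x ∈ S, a < x := fun x hx => (List.pairwise_cons.mp hpw.2.1).1 x (by simp [hx])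
        have hbS : ∀ x ∈ S, b < x := fun x hx =>
          (List.pairwise_cons.mp (List.pairwise_cons.mp hpw.2.1).2).1 x hx
        have hPa : ∀ x ∈ P, x < a := fun x hx => hpw.2.2 x hx a (by simp)
        have hpa : prv.getD a 0 = pvLastD P (-1) :=
          ((pvPChain_append prv P (-1) (a :: b :: S)).mp hInv.hpchain).2.1
        -- the head entry is the leftmost minimal pair
        have hlm := pvHead_isLmin (text := text) (qt := qt) hInv.hsorted hInv.hq_sorted
          hInv.hq_comp hval3.symm
        -- rewrite the reference side into one explicit merge
        obtain ⟨p0, q0, rest, hE⟩ : ∃ p0 q0 rest,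
            pvItems ln text (P ++ a :: b :: S) = p0 :: q0 :: rest := by
          have hL : 2 ≤ (pvItems ln text (P ++ a :: b :: S)).length := by
            simp only [pvItems, List.length_map, List.length_append, List.length_cons]; omega
          rcases hEE : pvItems ln text (P ++ a :: b :: S) with _ | ⟨p0, _ | ⟨q0, rest⟩⟩
          · rw [hEE] at hL; simp at hL
          · rw [hEE] at hL; simp at hL
          · exact ⟨p0, q0, rest, rfl⟩
        rw [hE, pvRefLoop_succ, ← hE]
        have hRef := pvRefArgmin_isLmin rest p0 q0
        rw [show pvSP (p0 :: q0 :: rest) = pvSP (pvItems ln text (P ++ a :: b :: S)) by rw [hE]]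
          at hRef
        obtain ⟨hsi1, hsi2⟩ := IsLmin_unique hRef hlm
        rw [hsi1, hsi2]
        have hgetA : (pvItems ln text (P ++ a :: b :: S)).getD P.length (0, "") =
            (ln.getD a 0, text.getD a "") := by
          rw [pvItems_getD _ _ _ _ (by simp only [List.length_append, List.length_cons]; omega),
            pvGetD_append_len]
        have hgetB : (pvItems ln text (P ++ a :: b :: S)).getD (P.length + 1) (0, "") =
            (ln.getD b 0, text.getD b "") := by
          rw [pvItems_getD _ _ _ _ (by simp only [List.length_append, List.length_cons]; omega)]
          rw [show P ++ a :: b :: S = (P ++ [a]) ++ b :: S by simp,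
            show P.length + 1 = (P ++ [a]).length by simp]
          rw [pvGetD_append_len]
        rw [hgetA, hgetB]
        rw [← pvItemsMerge ln text P S a b (s + 1)
          (String.ofList ((text.getD a "").toList ++ ' ' :: (text.getD b "").toList))
          (by rw [hInv.hlen_ln]; exact hin) (by rw [hInv.hlen_text]; exact hin)
          (fun x hx => by have := hPa x hx; omega)
          (fun x hx => by have := haS x hx; omega)]
        -- unfold one step of the port's loop
        rw [pvBLoop, if_pos hcnt, if_neg hval']
        simp only [hnab, PySem.List.pySetD_natCast, PySem.List.pyGetD_natCast]
        have hlen1 : ((P ++ a :: b :: S).length : Int) - 1 = ((P ++ a :: S).length : Int) := by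
          simp; omega
        rw [hlen1]
        have hfuel' : f = (((P ++ a :: S).length : Int) - limit).toNat := by
          have h1 : (P ++ a :: b :: S).length = (P ++ a :: S).length + 1 := by
            simp only [List.length_append, List.length_cons]; omega
          rw [h1] at hfuel
          omega
        have hqt_sorted : qt.Pairwise pvLe := (List.pairwise_cons.mp hInv.hq_sorted).2
        have hqt_bound : ∀ e ∈ qt, 0 ≤ e.2 ∧ e.2 < (nn : Int) :=
          fun e he => hInv.hq_bound e (by simp [he])
        -- case on whether the merged node has a right neighbour
        cases S with
        | nil =>
          have hcS : nxt.getD b 0 = (nn : Int) := hchbS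
          have hnlt : ¬ ((nn : Int) < (nn : Int)) := by omega
          rw [hcS]
          rw [if_neg hnlt, if_neg hnlt]
          rw [hpa]
          rcases List.eq_nil_or_concat P with rfl | ⟨P₀, pl, rfl⟩ <;>
            simp only [List.concat_eq_append] at *
          · have hneg : ¬ ((0 : Int) ≤ -1) := by norm_num
            rw [show pvLastD [] (-1) = (-1 : Int) from rfl, if_neg hneg]
            refine ihf _ _ _ _ _ _ _ ?_ hfuel'
            have hinv' := pvMergeInv hInv.hlen_text hInv.hlen_ln hInv.hlen_nxt hInv.hlen_prv
              hInv.hlen_alive hInv.hsorted hInv.hmem hInv.hchain hInv.hpchain hInv.hq_comp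
              hqt_sorted hqt_bound (fun e he => he) (Or.inl rfl) (Or.inl rfl)
            rw [hcS, if_neg hnlt] at hinv'
            exact hinv'
          · have hplast : pvLastD (P₀ ++ [pl]) (-1) = (pl : Int) := by
              simp [pvLastD]
            have hpos : (0 : Int) ≤ ((pl : Nat) : Int) := by positivity
            rw [hplast, if_pos hpos]
            simp only [PySem.List.pyGetD_natCast]
            refine ihf _ _ _ _ _ _ _ ?_ hfuel'
            have hpl_nn : pl < nn := ((hInv.hmem pl).mp (by simp)).1
            have hinv' := pvMergeInv hInv.hlen_text hInv.hlen_ln hInv.hlen_nxt hInv.hlen_prv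
              hInv.hlen_alive hInv.hsorted hInv.hmem hInv.hchain hInv.hpchain hInv.hq_comp
              (sorted_pvPush hqt_sorted)
              (fun e he => by
                rcases mem_pvPush.mp he with h | rfl
                · exact hqt_bound e h
                · exact ⟨by simp, by simpa using hpl_nn⟩)
              (fun e he => mem_pvPush.mpr (Or.inl he))
              (Or.inl rfl)
              (Or.inr ⟨P₀, pl, rfl, mem_pvPush.mpr (Or.inr rfl)⟩)
            rw [hcS, if_neg hnlt] at hinv'
            exact hinv'
        | cons d S' =>
          have hc : nxt.getD b 0 = (d : Int) := hchbS.1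
          have hd_nn : d < nn := ((hInv.hmem d).mp (by simp)).1
          have had : a < d := haS d (by simp)
          have hdlt : ((d : Nat) : Int) < (nn : Int) := by exact_mod_cast hd_nn
          rw [hc]
          rw [if_pos hdlt, if_pos hdlt]
          simp only [PySem.List.pySetD_natCast, PySem.List.pyGetD_natCast]
          rw [pvGetD_set_ne _ _ _ _ _ (by omega : a ≠ d), hpa]
          rcases List.eq_nil_or_concat P with rfl | ⟨P₀, pl, rfl⟩ <;>
            simp only [List.concat_eq_append] at *
          · have hneg : ¬ ((0 : Int) ≤ -1) := by norm_num
            rw [show pvLastD [] (-1) = (-1 : Int) from rfl, if_neg hneg]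
            refine ihf _ _ _ _ _ _ _ ?_ hfuel'
            have hinv' := pvMergeInv hInv.hlen_text hInv.hlen_ln hInv.hlen_nxt hInv.hlen_prv
              hInv.hlen_alive hInv.hsorted hInv.hmem hInv.hchain hInv.hpchain hInv.hq_comp
              (sorted_pvPush hqt_sorted)
              (fun e he => by
                rcases mem_pvPush.mp he with h | rfl
                · exact hqt_bound e h
                · exact ⟨by simp, by simpa using hin⟩)
              (fun e he => mem_pvPush.mpr (Or.inl he))
              (Or.inr ⟨d, S', rfl, mem_pvPush.mpr (Or.inr rfl)⟩)
              (Or.inl rfl)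
            rw [hc, if_pos hdlt, show ((d : Nat) : Int).toNat = d by omega] at hinv'
            exact hinv'
          · have hplast : pvLastD (P₀ ++ [pl]) (-1) = (pl : Int) := by
              simp [pvLastD]
            have hpos : (0 : Int) ≤ ((pl : Nat) : Int) := by positivity
            rw [hplast, if_pos hpos]
            simp only [PySem.List.pyGetD_natCast]
            refine ihf _ _ _ _ _ _ _ ?_ hfuel'
            have hpl_nn : pl < nn := ((hInv.hmem pl).mp (by simp)).1
            have hinv' := pvMergeInv hInv.hlen_text hInv.hlen_ln hInv.hlen_nxt hInv.hlen_prv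
              hInv.hlen_alive hInv.hsorted hInv.hmem hInv.hchain hInv.hpchain hInv.hq_comp
              (sorted_pvPush (sorted_pvPush hqt_sorted))
              (fun e he => by
                rcases mem_pvPush.mp he with h | rfl
                · rcases mem_pvPush.mp h with h' | rfl
                  · exact hqt_bound e h'
                  · exact ⟨by simp, by simpa using hin⟩
                · exact ⟨by simp, by simpa using hpl_nn⟩)
              (fun e he => mem_pvPush.mpr (Or.inl (mem_pvPush.mpr (Or.inl he))))
              (Or.inr ⟨d, S', rfl, mem_pvPush.mpr (Or.inl (mem_pvPush.mpr (Or.inr rfl)))⟩)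
              (Or.inr ⟨P₀, pl, rfl, mem_pvPush.mpr (Or.inr rfl)⟩)
            rw [hc, if_pos hdlt, show ((d : Nat) : Int).toNat = d by omega] at hinv'
            exact hinv'


-- getD of an initial array built as a map over range
theorem pvGetD_rangemap (nn : Nat) (f : Int → Int) (x : Nat) (h : x < nn) :
    (((PySem.List.pyRange 0 (nn : Int) 1).map f).getD x 0) = f (x : Int) := by
  rw [PySem.List.pyRange_one, show (((nn : Int)) - 0).toNat = nn by omega, List.map_map]
  rw [List.getD_eq_getElem _ _ (by simpa using h)]
  simp

theorem pvChain_range' (nxt : List Int) :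
    ∀ (k s : Nat), (∀ x, s ≤ x → x < s + k → nxt.getD x 0 = (x : Int) + 1) →
    pvChain nxt ((s + k : Nat) : Int) (List.range' s k)
  | 0, s, h => trivial
  | 1, s, h => by
    show nxt.getD s 0 = ((s + 1 : Nat) : Int)
    rw [h s (by omega) (by omega)]
    push_cast; ring
  | (k + 2), s, h => by
    have ih := pvChain_range' nxt (k + 1) (s + 1) (fun x h1 h2 => h x (by omega) (by omega))
    rw [List.range'_succ, List.range'_succ]
    rw [List.range'_succ] at ih
    refine ⟨?_, ?_⟩
    · rw [h s (by omega) (by omega)]; push_cast; ring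
    · rw [show ((s + (k + 2) : Nat) : Int) = (((s + 1) + (k + 1) : Nat) : Int) by push_cast; ring]
      exact ih

theorem pvPChain_range' (prv : List Int) :
    ∀ (k s : Nat), (∀ x, s ≤ x → x < s + k → prv.getD x 0 = (x : Int) - 1) →
    pvPChain prv ((s : Int) - 1) (List.range' s k)
  | 0, _, _ => trivial
  | (k + 1), s, h => by
    rw [List.range'_succ]
    refine ⟨h s (by omega) (by omega), ?_⟩
    have ih := pvPChain_range' prv k (s + 1) (fun x h1 h2 => h x (by omega) (by omega))
    rw [show (((s + 1 : Nat)) : Int) - 1 = (s : Int) by push_cast; ring] at ih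
    exact ih

theorem sorted_foldl_pvPush {β : Type} (f : β → Int × Int) :
    ∀ (l : List β) (q0 : List (Int × Int)), q0.Pairwise pvLe →
    (l.foldl (fun q x => pvPush q (f x)) q0).Pairwise pvLe
  | [], _, h => h
  | x :: t, q0, h => sorted_foldl_pvPush f t _ (sorted_pvPush h)

theorem mem_foldl_pvPush {β : Type} (f : β → Int × Int) :
    ∀ (l : List β) (q0 : List (Int × Int)) (y : Int × Int),
    y ∈ l.foldl (fun q x => pvPush q (f x)) q0 ↔ y ∈ q0 ∨ ∃ x ∈ l, y = f x
  | [], q0, y => by simp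
  | x :: t, q0, y => by
    rw [List.foldl_cons, mem_foldl_pvPush f t _ y, mem_pvPush]
    constructor
    · rintro ((h | h) | ⟨z, hz, rfl⟩)
      · exact Or.inl h
      · exact Or.inr ⟨x, by simp, h⟩
      · exact Or.inr ⟨z, by simp [hz], rfl⟩
    · rintro (h | ⟨z, hz, rfl⟩)
      · exact Or.inl (Or.inl h)
      · rcases List.mem_cons.mp hz with rfl | hz'
        · exact Or.inl (Or.inr rfl)
        · exact Or.inr ⟨z, hz', rfl⟩

theorem pvComp_of_forall (ln : List Int) (q : List (Int × Int)) :
    ∀ A : List Nat, (∀ k, k + 1 < A.length →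
      (ln.getD (A.getD k 0) 0 + ln.getD (A.getD (k + 1) 0) 0, (A.getD k 0 : Int)) ∈ q) →
    pvComp ln q A
  | [], _ => trivial
  | [x], _ => trivial
  | x :: y :: t, h =>
    ⟨by simpa using h 0 (by simp), pvComp_of_forall ln q (y :: t)
      (fun k hk => by simpa using h (k + 1) (by simp at hk ⊢; omega))⟩

-- the initial state satisfies the invariant
theorem pvInit (sentences : List String) (hn : 1 ≤ sentences.length) :
    pvInv sentences.length sentences (sentences.map PySem.Str.len)
      ((PySem.List.pyRange 0 (PySem.List.len sentences) 1).map (· + 1))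
      ((PySem.List.pyRange 0 (PySem.List.len sentences) 1).map (· - 1))
      (sentences.map (fun _ => true))
      ((PySem.List.pyRange 0 (PySem.List.len sentences - 1) 1).foldl
        (fun q i => pvPush q (PySem.List.pyGetD (sentences.map PySem.Str.len) i 0 +
          PySem.List.pyGetD (sentences.map PySem.Str.len) (i + 1) 0, i)) [])
      (List.range sentences.length) := by
  rw [PySem.List.len_eq]
  constructor
  case hlen_text => rfl
  case hlen_ln => simp
  case hlen_nxt => simp [PySem.List.pyRange_one]
  case hlen_prv => simp [PySem.List.pyRange_one]
  case hlen_alive => simp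
  case hsorted => exact List.pairwise_lt_range
  case hmem =>
    intro a
    simp only [List.mem_range]
    constructor
    · intro ha
      refine ⟨ha, ?_⟩
      rw [List.getD_eq_getElem _ _ (by simpa using ha)]
      simp
    · rintro ⟨ha, _⟩; exact ha
  case hchain =>
    rw [List.range_eq_range']
    have := pvChain_range' ((PySem.List.pyRange 0 (sentences.length : Int) 1).map (· + 1))
      sentences.length 0
      (fun x h1 h2 => by rw [pvGetD_rangemap sentences.length _ x (by omega)])
    simpa using this
  case hpchain =>
    rw [List.range_eq_range']
    have := pvPChain_range' ((PySem.List.pyRange 0 (sentences.length : Int) 1).map (· - 1))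
      sentences.length 0
      (fun x h1 h2 => by rw [pvGetD_rangemap sentences.length _ x (by omega)])
    simpa using this
  case hq_sorted => exact sorted_foldl_pvPush _ _ [] (by simp)
  case hq_bound =>
    intro e he
    rw [mem_foldl_pvPush] at he
    rcases he with h | ⟨x, hx, rfl⟩
    · simp at h
    · rw [PySem.List.mem_pyRange_one] at hx
      constructor
      · exact hx.1
      · have := hx.2; omega
  case hq_comp =>
    apply pvComp_of_forall
    intro k hk
    have hklen : k + 1 < sentences.length := by simpa using hk
    have hgk : (List.range sentences.length).getD k 0 = k := by
      rw [List.getD_eq_getElem _ _ (by simp; omega)]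
      simp
    have hgk1 : (List.range sentences.length).getD (k + 1) 0 = k + 1 := by
      rw [List.getD_eq_getElem _ _ (by simpa using hklen)]
      simp
    rw [hgk, hgk1, mem_foldl_pvPush]
    refine Or.inr ⟨(k : Int), ?_, ?_⟩
    · rw [PySem.List.mem_pyRange_one]
      constructor
      · omega
      · omega
    · rw [show ((k : Int) + 1) = ((k + 1 : Nat) : Int) by push_cast; ring]
      rw [PySem.List.pyGetD_natCast, PySem.List.pyGetD_natCast]

theorem pvItems_init (sentences : List String) :
    pvItems (sentences.map PySem.Str.len) sentences (List.range sentences.length) =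
      sentences.map pvPair := by
  apply List.ext_getElem
  · simp [pvItems]
  · intro i h1 h2
    have hi : i < sentences.length := by simpa [pvItems] using h2
    simp only [pvItems, List.getElem_map, List.getElem_range, pvPair]
    rw [List.getD_eq_getElem _ _ (by simpa using hi), List.getD_eq_getElem _ _ hi]
    simp

-- ===== VERDICT (by name: the statement is the Claim_ definition above) =====
theorem merge_to_limit_py_spec : Claim_equal_merge_to_limit_py := by
  intro xs limit _ hpre
  unfold Spec_merge_to_limit_py merge_to_limit_py_alt
  by_cases hle : PySem.List.len xs ≤ limit
  · rw [if_pos hle]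
    rw [merge_to_limit_py, if_neg (by omega)]
  · rw [if_neg hle]
    rw [PySem.List.len_eq] at hle ⊢
    have hlim : 1 ≤ limit := by
      rcases hpre with h | h
      · exact h
      · omega
    have hn1 : 1 ≤ xs.length := by omega
    have h0 := pvBLoop_eq xs.length limit hlim (((xs.length : Int) - limit).toNat)
      xs (xs.map PySem.Str.len)
      ((PySem.List.pyRange 0 (xs.length : Int) 1).map (· + 1))
      ((PySem.List.pyRange 0 (xs.length : Int) 1).map (· - 1))
      (xs.map (fun _ => true))
      ((PySem.List.pyRange 0 ((xs.length : Int) - 1) 1).foldl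
        (fun q i => pvPush q (PySem.List.pyGetD (xs.map PySem.Str.len) i 0 +
          PySem.List.pyGetD (xs.map PySem.Str.len) (i + 1) 0, i)) [])
      (List.range xs.length)
      (by simpa [PySem.List.len_eq] using pvInit xs hn1)
      (by simp)
    rw [pvItems_init] at h0
    rw [pvMain xs.length xs limit rfl hpre]
    simpa [PySem.List.len_eq] using h0.symm
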